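-- pv_equiv track=rewrite | github.com/coolbuoy-in-making/sjmDummy2 | python/upworkModel copy.py | find_similar_skills
-- ===== SOURCE A (Python) =====
-- from typing import List, Dict, Optional, Any, Union
--
-- def find_similar_skills(skills: List[str]) -> List[str]:
--     """Find similar or related skills"""
--     skill_map = {
--         'react': ['reactjs', 'react.js', 'react native'],
--         'nodejs': ['node.js', 'node', 'express.js'],
--         'python': ['django', 'flask', 'fastapi'],
--         'ui': ['freelancer interface', 'ux design', 'web design'],
--         'aws': ['cloud computing', 'devops', 'azure'],
--         # Add more mappings as needed
--     }
--
--     similar = set()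
--     for skill in skills:
--         skill_lower = skill.lower()
--         for key, values in skill_map.items():
--             if skill_lower in [key] + values:
--                 similar.update(values)
--
--     return list(similar - set(skills))
-- ===== SOURCE B (Python) =====
-- def find_similar_skills(skills):
--     """Find similar or related skills"""
--     skill_map = {
--         'react': ['reactjs', 'react.js', 'react native'],
--         'nodejs': ['node.js', 'node', 'express.js'],
--         'python': ['django', 'flask', 'fastapi'],
--         'ui': ['freelancer interface', 'ux design', 'web design'],
--         'aws': ['cloud computing', 'devops', 'azure'],
--     }
--
--     # reverse index: every lookup token (key or variant) -> that group's values
--     index = {}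
--     for key, values in skill_map.items():
--         for token in [key] + values:
--             index[token] = values
--
--     similar = set()
--     for skill in skills:
--         values = index.get(skill.lower())
--         if values is not None:
--             similar.update(values)
--
--     return list(similar - set(skills))
-- ===== Notes on version B (the rewrite author's own statement) =====
-- stated objective: simpler
-- what changed: B builds a reverse index (every key and variant token -> that group's values) once before the loop, so each skill needs one dict lookup instead of a scan over all groups with a per-group membership test.
import Mathlib
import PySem

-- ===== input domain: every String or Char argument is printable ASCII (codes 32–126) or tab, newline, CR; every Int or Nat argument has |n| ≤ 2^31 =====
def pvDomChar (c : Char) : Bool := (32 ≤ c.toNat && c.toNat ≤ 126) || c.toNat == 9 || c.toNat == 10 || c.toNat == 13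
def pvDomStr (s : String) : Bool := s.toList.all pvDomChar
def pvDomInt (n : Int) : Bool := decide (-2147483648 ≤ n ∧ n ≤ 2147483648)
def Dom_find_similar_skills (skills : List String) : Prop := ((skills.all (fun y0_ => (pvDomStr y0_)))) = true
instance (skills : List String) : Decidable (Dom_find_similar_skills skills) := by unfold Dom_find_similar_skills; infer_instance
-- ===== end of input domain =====

-- B replaces A's per-skill scan over all five groups by a reverse token index built once before the loop,
-- then a single dict lookup per skill (objective: simpler structure; same output).


-- ===== PORT A =====
-- the literal skill_map dict, shared by both ports (insertion order)
def pvSkillMap : List (String × List String) :=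
  [("react", ["reactjs", "react.js", "react native"]),
   ("nodejs", ["node.js", "node", "express.js"]),
   ("python", ["django", "flask", "fastapi"]),
   ("ui", ["freelancer interface", "ux design", "web design"]),
   ("aws", ["cloud computing", "devops", "azure"])]

-- A: for each skill, scan every (key, values) group; on membership of the lowercased skill
-- in [key] + values, similar.update(values); finally list(similar - set(skills)).
def find_similar_skills (skills : List String) : List String :=
  let similar : PySem.Set String :=
    skills.foldl (fun similar skill =>
      let skill_lower := PySem.Str.lower skill
      pvSkillMap.foldl (fun similar kv =>
        if ([kv.1] ++ kv.2).contains skill_lower then PySem.Set.update similar kv.2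
        else similar) similar) PySem.Set.empty
  PySem.Set.diff similar (PySem.Set.ofList skills)

-- ===== PORT B =====
-- B: reverse index built once — every token (key or variant) maps to its group's values list
def pvIndex : PySem.Dict String (List String) :=
  pvSkillMap.foldl (fun d kv =>
    ([kv.1] ++ kv.2).foldl (fun d token => d.insert token kv.2) d) PySem.Dict.empty

def find_similar_skills_alt (skills : List String) : List String :=
  let similar : PySem.Set String :=
    skills.foldl (fun similar skill =>
      match pvIndex.get? (PySem.Str.lower skill) with
      | some values => PySem.Set.update similar values
      | none => similar) PySem.Set.empty
  PySem.Set.diff similar (PySem.Set.ofList skills)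

-- ===== PRECONDITION & SPEC =====
def Spec_find_similar_skills (skills : List String) (out : List String) : Prop := out = find_similar_skills_alt skills
instance (skills : List String) (out : List String) : Decidable (Spec_find_similar_skills skills out) := by unfold Spec_find_similar_skills; infer_instance

-- ===== CLAIM (what is proved, stated in full; the proofs are below) =====
def Claim_equal_find_similar_skills : Prop := ∀ (skills : List String), Dom_find_similar_skills skills → Spec_find_similar_skills skills (find_similar_skills skills)

-- ===== LEMMAS AND PROOFS =====

-- the fold that builds pvIndex evaluates to this literal dict (closed term)
theorem pvIndex_eq : pvIndex = PySem.Dict.mk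
  [("react", ["reactjs", "react.js", "react native"]), ("reactjs", ["reactjs", "react.js", "react native"]),
   ("react.js", ["reactjs", "react.js", "react native"]), ("react native", ["reactjs", "react.js", "react native"]),
   ("nodejs", ["node.js", "node", "express.js"]), ("node.js", ["node.js", "node", "express.js"]),
   ("node", ["node.js", "node", "express.js"]), ("express.js", ["node.js", "node", "express.js"]),
   ("python", ["django", "flask", "fastapi"]), ("django", ["django", "flask", "fastapi"]),
   ("flask", ["django", "flask", "fastapi"]), ("fastapi", ["django", "flask", "fastapi"]),
   ("ui", ["freelancer interface", "ux design", "web design"]),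
   ("freelancer interface", ["freelancer interface", "ux design", "web design"]),
   ("ux design", ["freelancer interface", "ux design", "web design"]),
   ("web design", ["freelancer interface", "ux design", "web design"]),
   ("aws", ["cloud computing", "devops", "azure"]), ("cloud computing", ["cloud computing", "devops", "azure"]),
   ("devops", ["cloud computing", "devops", "azure"]), ("azure", ["cloud computing", "devops", "azure"])] := by decide

-- every lookup token of the skill map
def pvTokens : List String := pvSkillMap.flatMap (fun kv => [kv.1] ++ kv.2)

-- per-skill step equality: A's scan over all groups = B's single index lookup, for every pending set
theorem pv_step_eq (s : PySem.Set String) (sl : String) :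
    pvSkillMap.foldl (fun similar kv =>
      if ([kv.1] ++ kv.2).contains sl then PySem.Set.update similar kv.2
      else similar) s
    = (match pvIndex.get? sl with
       | some values => PySem.Set.update s values
       | none => s) := by
  by_cases hm : sl ∈ pvTokens
  · simp [pvTokens, pvSkillMap] at hm
    rcases hm with h|h|h|h|h|h|h|h|h|h|h|h|h|h|h|h|h|h|h|h <;> subst h <;> rfl
  · simp [pvTokens, pvSkillMap] at hm
    obtain ⟨h1,h2,h3,h4,h5,h6,h7,h8,h9,h10,h11,h12,h13,h14,h15,h16,h17,h18,h19,h20⟩ := hm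
    rw [pvIndex_eq]
    simp [pvSkillMap, List.contains_eq_mem, PySem.Dict.get?,
          h1,h2,h3,h4,h5,h6,h7,h8,h9,h10,h11,h12,h13,h14,h15,h16,h17,h18,h19,h20,
          Ne.symm h1, Ne.symm h2, Ne.symm h3, Ne.symm h4, Ne.symm h5, Ne.symm h6, Ne.symm h7,
          Ne.symm h8, Ne.symm h9, Ne.symm h10, Ne.symm h11, Ne.symm h12, Ne.symm h13, Ne.symm h14,
          Ne.symm h15, Ne.symm h16, Ne.symm h17, Ne.symm h18, Ne.symm h19, Ne.symm h20]

-- the whole accumulation over skills agrees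
theorem pv_fold_eq (skills : List String) (s : PySem.Set String) :
    skills.foldl (fun similar skill =>
      pvSkillMap.foldl (fun similar kv =>
        if ([kv.1] ++ kv.2).contains (PySem.Str.lower skill) then PySem.Set.update similar kv.2
        else similar) similar) s
    = skills.foldl (fun similar skill =>
      match pvIndex.get? (PySem.Str.lower skill) with
      | some values => PySem.Set.update similar values
      | none => similar) s := by
  induction skills generalizing s with
  | nil => rfl
  | cons x xs ih =>
    simp only [List.foldl_cons]
    rw [pv_step_eq]
    exact ih _

-- ===== VERDICT (by name: the statement is the Claim_ definition above) =====
theorem find_similar_skills_spec : Claim_equal_find_similar_skills := by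
  intro skills _
  unfold Spec_find_similar_skills find_similar_skills find_similar_skills_alt
  rw [pv_fold_eq]
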